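-- pv_equiv track=rewrite | github.com/ffelipev2/ProyectosPython | main.py | imprimir_texto_entre_tokens
-- ===== SOURCE A (Python) =====
-- def imprimir_texto_entre_tokens(lista_tokens, tokens_inicio, tokens_fin, ocurrencia=1):
--     # Variable para almacenar el resultado
--     resultado = ""
--     ocurrencias_encontradas = 0
--
--     # Buscar todas las ocurrencias de la secuencia de tokens de inicio
--     for i in range(len(lista_tokens) - len(tokens_inicio) + 1):
--         if lista_tokens[i:i + len(tokens_inicio)] == tokens_inicio:
--             ocurrencias_encontradas += 1
--
--             # Verificar si esta es la ocurrencia que se quiere imprimir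
--             if ocurrencias_encontradas == ocurrencia:
--                 indice_inicio = i
--
--                 # Buscar el índice de la secuencia de tokens de fin
--                 for j in range(i + len(tokens_inicio), len(lista_tokens) - len(tokens_fin) + 1):
--                     if lista_tokens[j:j + len(tokens_fin)] == tokens_fin:
--                         indice_fin = j
--
--                         # Obtener el texto entre las secuencias de tokens de inicio y fin
--                         texto_entre_tokens = lista_tokens[indice_inicio + len(tokens_inicio):indice_fin]
--                         resultado = ' '.join(texto_entre_tokens)
--                         break
--                 break  # Romper el bucle externo si se encuentra la ocurrencia deseada
--
--     return resultado
-- ===== SOURCE B (Python) =====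
-- def imprimir_texto_entre_tokens(lista_tokens, tokens_inicio, tokens_fin, ocurrencia=1):
--     n = len(lista_tokens)
--
--     def tabla_bordes(pat):
--         # fail[q] = length of the longest proper border of pat[:q]
--         fail = [0] * (len(pat) + 1)
--         for q in range(1, len(pat) + 1):
--             b = q - 1
--             while b > 0 and pat[:b] != pat[q - b:q]:
--                 b -= 1
--             fail[q] = b
--         return fail
--
--     def ocurrencias(pat, desde):
--         # KMP scan: all positions >= desde where pat occurs in lista_tokens
--         if not pat:
--             return list(range(desde, n + 1))
--         fail = tabla_bordes(pat)
--         posiciones = []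
--         q = 0
--         for i in range(desde, n):
--             c = lista_tokens[i]
--             if q == len(pat):
--                 q = fail[q]
--             while q > 0 and pat[q] != c:
--                 q = fail[q]
--             if pat[q] == c:
--                 q += 1
--             if q == len(pat):
--                 posiciones.append(i + 1 - len(pat))
--         return posiciones
--
--     inicios = ocurrencias(tokens_inicio, 0)
--     if not (1 <= ocurrencia <= len(inicios)):
--         return ""
--     comienzo = inicios[ocurrencia - 1] + len(tokens_inicio)
--     fines = ocurrencias(tokens_fin, comienzo)
--     if not fines:
--         return ""
--     return " ".join(lista_tokens[comienzo:fines[0]])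
-- ===== Notes on version B (the rewrite author's own statement) =====
-- stated objective: alternative
-- what changed: A's rescan-from-scratch slice comparison at every candidate position (for the start sequence and again for the end sequence) is replaced by Knuth-Morris-Pratt matching: a precomputed border (failure) table per pattern and a single left-to-right scan whose matched-length state never re-reads earlier text tokens.
import Mathlib
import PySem

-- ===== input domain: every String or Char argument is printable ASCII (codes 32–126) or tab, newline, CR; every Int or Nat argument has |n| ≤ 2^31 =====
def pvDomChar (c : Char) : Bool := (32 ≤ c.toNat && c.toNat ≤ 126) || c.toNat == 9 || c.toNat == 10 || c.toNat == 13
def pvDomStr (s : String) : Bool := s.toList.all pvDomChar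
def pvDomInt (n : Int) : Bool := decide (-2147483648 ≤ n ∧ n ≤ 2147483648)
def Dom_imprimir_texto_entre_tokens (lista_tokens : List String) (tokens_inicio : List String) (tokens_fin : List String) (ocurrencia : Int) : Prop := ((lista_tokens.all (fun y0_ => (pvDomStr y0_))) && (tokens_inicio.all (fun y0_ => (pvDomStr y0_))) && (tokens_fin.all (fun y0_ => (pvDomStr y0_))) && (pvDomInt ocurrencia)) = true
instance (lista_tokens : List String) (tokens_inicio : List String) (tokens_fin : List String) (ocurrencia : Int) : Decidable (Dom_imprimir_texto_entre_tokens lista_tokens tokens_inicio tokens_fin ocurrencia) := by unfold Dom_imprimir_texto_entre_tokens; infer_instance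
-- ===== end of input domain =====

-- B replaces A's rescan-at-every-position slice comparison by Knuth-Morris-Pratt matching:
-- a precomputed border (failure) table per pattern and a single left-to-right scan whose
-- matched-length state never re-reads earlier text tokens (objective: alternative algorithm).

-- ===== PORT A =====
-- inner 'for j in range(...)' with break: first end match sets resultado and breaks
def pvAInnerLoop (lista_tokens tokens_fin : List String) (b : Int) : List Int → String
  | [] => ""
  | j :: rest =>
    if PySem.List.slice lista_tokens (some j) (some (j + (tokens_fin.length : Int))) = tokens_fin then
      PySem.Str.join " " (PySem.List.slice lista_tokens (some b) (some j))
    else pvAInnerLoop lista_tokens tokens_fin b rest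

-- outer 'for i in range(...)' with the occurrence counter and break
def pvAOuterLoop (lista_tokens tokens_inicio tokens_fin : List String) (ocurrencia : Int) (cnt : Int) : List Int → String
  | [] => ""
  | i :: rest =>
    if PySem.List.slice lista_tokens (some i) (some (i + (tokens_inicio.length : Int))) = tokens_inicio then
      if cnt + 1 = ocurrencia then
        pvAInnerLoop lista_tokens tokens_fin (i + (tokens_inicio.length : Int))
          (PySem.List.pyRange (i + (tokens_inicio.length : Int)) ((lista_tokens.length : Int) - (tokens_fin.length : Int) + 1) 1)
      else pvAOuterLoop lista_tokens tokens_inicio tokens_fin ocurrencia (cnt + 1) rest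
    else pvAOuterLoop lista_tokens tokens_inicio tokens_fin ocurrencia cnt rest

def imprimir_texto_entre_tokens (lista_tokens : List String) (tokens_inicio : List String) (tokens_fin : List String) (ocurrencia : Int) : String :=
  pvAOuterLoop lista_tokens tokens_inicio tokens_fin ocurrencia 0
    (PySem.List.pyRange 0 ((lista_tokens.length : Int) - (tokens_inicio.length : Int) + 1) 1)

-- ===== PORT B =====
-- Source B's 'while b > 0 and pat[:b] != pat[q-b:q]: b -= 1' (the body of tabla_bordes for one q);
-- the Python slices pat[:b] and pat[q-b:q] are ported as take/drop (exact for these in-range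
-- non-negative bounds)
def pvBordeLoop (pat : List String) (q : Nat) : Nat → Nat
  | 0 => 0
  | b + 1 =>
    if pat.take (b + 1) = (pat.take q).drop (q - (b + 1)) then b + 1
    else pvBordeLoop pat q b

-- Source B's border table 'fail' ported as a function: fail[q] = pvFail pat q (same values)
def pvFail (pat : List String) (q : Nat) : Nat := pvBordeLoop pat q (q - 1)

-- needed by pvAjusta's termination: the border search never returns more than where it starts
theorem pvBordeLoop_le (pat : List String) (q : Nat) : ∀ b, pvBordeLoop pat q b ≤ b := by
  intro b
  induction b with
  | zero => simp [pvBordeLoop]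
  | succ b ih =>
    rw [pvBordeLoop]
    split
    · exact Nat.le_refl _
    · exact Nat.le_succ_of_le ih

-- Source B's 'while q > 0 and pat[q] != c: q = fail[q]'
def pvAjusta (pat : List String) (c : String) (q : Nat) : Nat :=
  if _hq : 0 < q ∧ pat.getD q "" ≠ c then pvAjusta pat c (pvFail pat q) else q
termination_by q
decreasing_by exact Nat.lt_of_le_of_lt (pvBordeLoop_le pat q (q - 1)) (Nat.sub_lt _hq.1 Nat.one_pos)

-- Source B's 'for i in range(desde, n)' body of ocurrencias (pat nonempty), collecting positions
def pvKmpLoop (pat : List String) : List String → Nat → Nat → List Nat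
  | [], _, _ => []
  | c :: rest, i, q =>
    let q1 := if q = pat.length then pvFail pat pat.length else q
    let q2 := pvAjusta pat c q1
    let q3 := if pat.getD q2 "" = c then q2 + 1 else q2
    if q3 = pat.length then (i + 1 - pat.length) :: pvKmpLoop pat rest (i + 1) q3
    else pvKmpLoop pat rest (i + 1) q3

-- Source B's ocurrencias(pat, desde): KMP scan of lista_tokens[desde:]
def pvOcurrencias (pat texto : List String) (desde : Nat) : List Nat :=
  if pat = [] then List.range' desde (texto.length + 1 - desde)
  else pvKmpLoop pat (texto.drop desde) desde 0

def imprimir_texto_entre_tokens_alt (lista_tokens : List String) (tokens_inicio : List String) (tokens_fin : List String) (ocurrencia : Int) : String :=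
  let inicios := pvOcurrencias tokens_inicio lista_tokens 0
  if 1 ≤ ocurrencia ∧ ocurrencia ≤ (inicios.length : Int) then
    let comienzo := inicios.getD (ocurrencia - 1).toNat 0 + tokens_inicio.length
    match pvOcurrencias tokens_fin lista_tokens comienzo with
    | [] => ""
    | j :: _ => PySem.Str.join " " ((lista_tokens.drop comienzo).take (j - comienzo))
  else ""

-- ===== PRECONDITION & SPEC =====
def Spec_imprimir_texto_entre_tokens (lista_tokens : List String) (tokens_inicio : List String) (tokens_fin : List String) (ocurrencia : Int) (out : String) : Prop := out = imprimir_texto_entre_tokens_alt lista_tokens tokens_inicio tokens_fin ocurrencia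
instance (lista_tokens : List String) (tokens_inicio : List String) (tokens_fin : List String) (ocurrencia : Int) (out : String) : Decidable (Spec_imprimir_texto_entre_tokens lista_tokens tokens_inicio tokens_fin ocurrencia out) := by unfold Spec_imprimir_texto_entre_tokens; infer_instance

-- ===== CLAIM (what is proved, stated in full; the proofs are below) =====
def Claim_equal_imprimir_texto_entre_tokens : Prop := ∀ (lista_tokens : List String) (tokens_inicio : List String) (tokens_fin : List String) (ocurrencia : Int), Dom_imprimir_texto_entre_tokens lista_tokens tokens_inicio tokens_fin ocurrencia → Spec_imprimir_texto_entre_tokens lista_tokens tokens_inicio tokens_fin ocurrencia (imprimir_texto_entre_tokens lista_tokens tokens_inicio tokens_fin ocurrencia)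

-- ===== LEMMAS AND PROOFS =====

-- ---------- A-side characterization (first end match / nth start match) ----------

theorem pvAInnerLoop_eq_find (lista_tokens tokens_fin : List String) (b : Int) (js : List Int) :
    pvAInnerLoop lista_tokens tokens_fin b js =
      match js.find? (fun j => PySem.List.slice lista_tokens (some j) (some (j + (tokens_fin.length : Int))) == tokens_fin) with
      | some j => PySem.Str.join " " (PySem.List.slice lista_tokens (some b) (some j))
      | none => "" := by
  induction js with
  | nil => rfl
  | cons j rest ih =>
    by_cases h : PySem.List.slice lista_tokens (some j) (some (j + (tokens_fin.length : Int))) = tokens_fin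
    · simp [pvAInnerLoop, List.find?, h]
    · simp only [pvAInnerLoop, if_neg h, List.find?]
      rw [show (PySem.List.slice lista_tokens (some j) (some (j + (tokens_fin.length : Int))) == tokens_fin) = false by simpa using h]
      exact ih

theorem pvAOuterLoop_eq_select (lista_tokens tokens_inicio tokens_fin : List String) (ocurrencia : Int) (is : List Int) :
    ∀ cnt : Int,
    pvAOuterLoop lista_tokens tokens_inicio tokens_fin ocurrencia cnt is =
      (let sel := is.filter (fun i => PySem.List.slice lista_tokens (some i) (some (i + (tokens_inicio.length : Int))) == tokens_inicio)
       if 1 ≤ ocurrencia - cnt ∧ ocurrencia - cnt ≤ (sel.length : Int) then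
         pvAInnerLoop lista_tokens tokens_fin ((sel[(ocurrencia - cnt - 1).toNat]?).getD 0 + (tokens_inicio.length : Int))
           (PySem.List.pyRange ((sel[(ocurrencia - cnt - 1).toNat]?).getD 0 + (tokens_inicio.length : Int)) ((lista_tokens.length : Int) - (tokens_fin.length : Int) + 1) 1)
       else "") := by
  induction is with
  | nil =>
    intro cnt
    simp only [pvAOuterLoop, List.filter_nil]
    rw [if_neg (by simp; omega)]
  | cons i rest ih =>
    intro cnt
    by_cases h : PySem.List.slice lista_tokens (some i) (some (i + (tokens_inicio.length : Int))) = tokens_inicio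
    · have hb : (PySem.List.slice lista_tokens (some i) (some (i + (tokens_inicio.length : Int))) == tokens_inicio) = true := by
        simpa using h
      simp only [pvAOuterLoop, if_pos h, List.filter_cons, hb, if_true, List.length_cons]
      by_cases hc : cnt + 1 = ocurrencia
      · have h1 : ocurrencia - cnt = 1 := by omega
        rw [if_pos hc, if_pos (by push_cast; omega)]
        simp [h1]
      · have hidx : (ocurrencia - cnt - 1).toNat = (ocurrencia - (cnt + 1) - 1).toNat + 1 ∨ ocurrencia - cnt ≤ 0 := by omega
        rw [if_neg hc, ih (cnt + 1)]
        simp only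
        rcases hidx with hidx | hle
        · simp only [hidx, List.getElem?_cons_succ]
          split_ifs with ha hb2 <;> first | rfl | (exfalso; push_cast at *; omega)
        · rw [if_neg (by omega), if_neg (by push_cast; omega)]
    · have hb : (PySem.List.slice lista_tokens (some i) (some (i + (tokens_inicio.length : Int))) == tokens_inicio) = false := by
        simpa using h
      simp only [pvAOuterLoop, if_neg h, List.filter_cons, hb, if_false, Bool.false_eq_true]
      exact ih cnt

-- ---------- suffix toolkit ----------

-- of two suffixes of the same list, the shorter is a suffix of the longer
theorem pvSuffix_trans_le {x y u : List String} (hx : x <:+ u) (hy : y <:+ u)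
    (h : x.length ≤ y.length) : x <:+ y := by
  have hyl := hy.length_le
  rw [List.suffix_iff_eq_drop] at hx hy ⊢
  calc x = u.drop (u.length - x.length) := hx
    _ = (u.drop (u.length - y.length)).drop (y.length - x.length) := by
        rw [List.drop_drop]; congr 1; omega
    _ = y.drop (y.length - x.length) := by rw [← hy]

-- appending the same element preserves suffixes
theorem pvSuffix_append_one {x u : List String} (c : String) (h : x <:+ u) : x ++ [c] <:+ u ++ [c] := by
  obtain ⟨t, rfl⟩ := h
  exact ⟨t, by simp⟩

-- a suffix ending in a singleton decomposes
theorem pvSuffix_snoc_iff {x u : List String} {a c : String} :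
    x ++ [a] <:+ u ++ [c] ↔ a = c ∧ x <:+ u := by
  constructor
  · intro hs
    rw [← List.reverse_prefix] at hs
    simp only [List.reverse_append, List.reverse_singleton, List.singleton_append] at hs
    rw [List.cons_prefix_cons] at hs
    exact ⟨hs.1, List.reverse_prefix.mp hs.2⟩
  · rintro ⟨rfl, hs⟩
    exact pvSuffix_append_one _ hs

theorem pvTake_succ_getD (l : List String) (n : Nat) (h : n < l.length) :
    l.take (n + 1) = l.take n ++ [l.getD n ""] := by
  rw [List.take_add_one, List.getElem?_eq_getElem h, List.getD_eq_getElem?_getD,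
    List.getElem?_eq_getElem h]
  rfl

-- pat[:b] is a suffix of pat[:q] iff the two Python slices compared by tabla_bordes are equal
theorem pvTakeSuffix_iff (pat : List String) {b q : Nat} (hb : b ≤ q) (hq : q ≤ pat.length) :
    pat.take b <:+ pat.take q ↔ pat.take b = (pat.take q).drop (q - b) := by
  rw [List.suffix_iff_eq_drop, List.length_take, List.length_take,
    Nat.min_eq_left hq, Nat.min_eq_left (le_trans hb hq)]

-- ---------- failure-table correctness ----------

theorem pvBordeLoop_spec (pat : List String) {q : Nat} (hq : q ≤ pat.length) :
    ∀ b, b ≤ q → pvBordeLoop pat q b = Nat.findGreatest (fun b' => pat.take b' <:+ pat.take q) b := by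
  intro b
  induction b with
  | zero => intro _; rfl
  | succ b ih =>
    intro hb
    rw [pvBordeLoop, Nat.findGreatest_succ]
    by_cases hP : pat.take (b + 1) <:+ pat.take q
    · rw [if_pos ((pvTakeSuffix_iff pat hb hq).mp hP), if_pos hP]
    · rw [if_neg (fun hEq => hP ((pvTakeSuffix_iff pat hb hq).mpr hEq)), if_neg hP,
        ih (by omega)]

theorem pvFail_border (pat : List String) {q : Nat} (hq1 : 1 ≤ q) (hq : q ≤ pat.length) :
    pat.take (pvFail pat q) <:+ pat.take q := by
  rw [pvFail, pvBordeLoop_spec pat hq (q - 1) (by omega)]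
  exact Nat.findGreatest_spec (P := fun b' => pat.take b' <:+ pat.take q) (Nat.zero_le _)
    List.nil_suffix

theorem pvFail_lt (pat : List String) {q : Nat} (hq : 0 < q) : pvFail pat q < q :=
  Nat.lt_of_le_of_lt (pvBordeLoop_le pat q (q - 1)) (Nat.sub_lt hq Nat.one_pos)

theorem pvFail_max (pat : List String) {b q : Nat} (hb : b < q) (hq : q ≤ pat.length)
    (h : pat.take b <:+ pat.take q) : b ≤ pvFail pat q := by
  rw [pvFail, pvBordeLoop_spec pat hq (q - 1) (by omega)]
  exact Nat.le_findGreatest (by omega) h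

-- ---------- the matched-length invariant ----------

-- the longest prefix of pat that is a suffix of the processed text u
def pvM (pat u : List String) : Nat := Nat.findGreatest (fun b => pat.take b <:+ u) pat.length

theorem pvM_le (pat u : List String) : pvM pat u ≤ pat.length := Nat.findGreatest_le _

theorem pvM_suffix (pat u : List String) : pat.take (pvM pat u) <:+ u :=
  Nat.findGreatest_spec (P := fun b => pat.take b <:+ u) (Nat.zero_le _) List.nil_suffix

theorem pvM_max (pat u : List String) {b : Nat} (hb : b ≤ pat.length) (h : pat.take b <:+ u) :
    b ≤ pvM pat u := Nat.le_findGreatest hb h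

theorem pvM_nil (pat : List String) (hpat : pat ≠ []) : pvM pat [] = 0 := by
  have hs := pvM_suffix pat []
  rw [List.suffix_nil] at hs
  have hl : (pat.take (pvM pat [])).length = 0 := by rw [hs]; rfl
  rw [List.length_take] at hl
  rcases Nat.min_eq_zero_iff.mp hl with h | h
  · exact h
  · exact absurd (List.length_eq_zero_iff.mp h) hpat

theorem pvAjusta_spec (pat u : List String) (c : String) :
    ∀ q, q < pat.length → pat.take q <:+ u →
      pvAjusta pat c q ≤ q ∧
      pat.take (pvAjusta pat c q) <:+ u ∧
      (pvAjusta pat c q = 0 ∨ pat.getD (pvAjusta pat c q) "" = c) ∧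
      (∀ b, b ≤ q → pat.take b <:+ u → pat.getD b "" = c → b ≤ pvAjusta pat c q) := by
  intro q
  induction q using Nat.strong_induction_on with
  | _ q ih =>
    intro hqlen hsuf
    rw [pvAjusta]
    by_cases h : 0 < q ∧ pat.getD q "" ≠ c
    · rw [dif_pos h]
      have hflt : pvFail pat q < q := pvFail_lt pat h.1
      have hfsuf : pat.take (pvFail pat q) <:+ u :=
        (pvFail_border pat h.1 (le_of_lt hqlen)).trans hsuf
      obtain ⟨h1, h2, h3, h4⟩ := ih (pvFail pat q) hflt (lt_trans hflt hqlen) hfsuf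
      refine ⟨le_of_lt (lt_of_le_of_lt h1 hflt), h2, h3, ?_⟩
      intro b hb hbs hbc
      rcases Nat.lt_or_ge b q with hlt | hge
      · have hbq : pat.take b <:+ pat.take q := by
          refine pvSuffix_trans_le hbs hsuf ?_
          rw [List.length_take, List.length_take]
          omega
        exact h4 b (pvFail_max pat hlt (le_of_lt hqlen) hbq) hbs hbc
      · have hbq : b = q := le_antisymm hb hge
        rw [hbq] at hbc
        exact absurd hbc h.2
    · rw [dif_neg h]
      push Not at h
      refine ⟨le_refl q, hsuf, ?_, fun b hb _ _ => hb⟩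
      rcases Nat.eq_zero_or_pos q with h0 | h0
      · exact Or.inl h0
      · exact Or.inr (h h0)

-- one KMP step computes the matched-length invariant for the extended text
theorem pvStep (pat u : List String) (c : String) (hpat : pat ≠ []) :
    (if pat.getD (pvAjusta pat c (if pvM pat u = pat.length then pvFail pat pat.length else pvM pat u)) "" = c
     then pvAjusta pat c (if pvM pat u = pat.length then pvFail pat pat.length else pvM pat u) + 1
     else pvAjusta pat c (if pvM pat u = pat.length then pvFail pat pat.length else pvM pat u)) = pvM pat (u ++ [c]) := by
  have hlen : 0 < pat.length := List.length_pos_of_ne_nil hpat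
  set q := pvM pat u with hqdef
  set q1 := if q = pat.length then pvFail pat pat.length else q with hq1def
  have hmain : q1 < pat.length ∧ pat.take q1 <:+ u ∧
      ∀ b, b < pat.length → pat.take b <:+ u → b ≤ q1 := by
    by_cases hqe : q = pat.length
    · have hp : pat <:+ u := by
        have := pvM_suffix pat u
        rw [← hqdef, hqe, List.take_length] at this
        exact this
      rw [hq1def, if_pos hqe]
      refine ⟨pvFail_lt pat hlen, ?_, ?_⟩
      · have := pvFail_border pat hlen (le_refl pat.length)
        rw [List.take_length] at this
        exact this.trans hp
      · intro b hb hbs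
        have hbq : pat.take b <:+ pat.take pat.length := by
          rw [List.take_length]
          exact pvSuffix_trans_le hbs hp (by rw [List.length_take]; omega)
        exact pvFail_max pat hb (le_refl _) hbq
    · rw [hq1def, if_neg hqe]
      refine ⟨lt_of_le_of_ne (pvM_le pat u) hqe, pvM_suffix pat u, ?_⟩
      intro b hb hbs
      exact pvM_max pat u (le_of_lt hb) hbs
  obtain ⟨hq1lt, hq1suf, hq1max⟩ := hmain
  obtain ⟨hA1, hA2, hA3, hA4⟩ := pvAjusta_spec pat u c q1 hq1lt hq1suf
  set q2 := pvAjusta pat c q1 with hq2def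
  have hq2lt : q2 < pat.length := lt_of_le_of_lt hA1 hq1lt
  by_cases hc : pat.getD q2 "" = c
  · rw [if_pos hc]
    have hP : pat.take (q2 + 1) <:+ u ++ [c] := by
      rw [pvTake_succ_getD pat q2 hq2lt, hc]
      exact pvSuffix_append_one c hA2
    have hge : q2 + 1 ≤ pvM pat (u ++ [c]) := pvM_max pat _ (by omega) hP
    have hle : pvM pat (u ++ [c]) ≤ q2 + 1 := by
      by_contra hcon
      push Not at hcon
      have hMs := pvM_suffix pat (u ++ [c])
      have hMlen := pvM_le pat (u ++ [c])
      have hsplit : pat.take (pvM pat (u ++ [c])) =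
          pat.take (pvM pat (u ++ [c]) - 1) ++ [pat.getD (pvM pat (u ++ [c]) - 1) ""] := by
        have h' := pvTake_succ_getD pat (pvM pat (u ++ [c]) - 1) (by omega)
        rw [← h']
        congr 1
        omega
      rw [hsplit] at hMs
      obtain ⟨hac, hMs'⟩ := pvSuffix_snoc_iff.mp hMs
      have hble : pvM pat (u ++ [c]) - 1 ≤ q1 := hq1max _ (by omega) hMs'
      have : pvM pat (u ++ [c]) - 1 ≤ q2 := hA4 _ hble hMs' hac
      omega
    omega
  · rw [if_neg hc]
    have hq20 : q2 = 0 := by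
      rcases hA3 with h0 | hcc
      · exact h0
      · exact absurd hcc hc
    have hM0 : pvM pat (u ++ [c]) = 0 := by
      by_contra hcon
      have hM1 : 1 ≤ pvM pat (u ++ [c]) := Nat.pos_of_ne_zero hcon
      have hMs := pvM_suffix pat (u ++ [c])
      have hMlen := pvM_le pat (u ++ [c])
      have hsplit : pat.take (pvM pat (u ++ [c])) =
          pat.take (pvM pat (u ++ [c]) - 1) ++ [pat.getD (pvM pat (u ++ [c]) - 1) ""] := by
        have h' := pvTake_succ_getD pat (pvM pat (u ++ [c]) - 1) (by omega)
        rw [← h']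
        congr 1
        omega
      rw [hsplit] at hMs
      obtain ⟨hac, hMs'⟩ := pvSuffix_snoc_iff.mp hMs
      have hble : pvM pat (u ++ [c]) - 1 ≤ q1 := hq1max _ (by omega) hMs'
      have hb2 : pvM pat (u ++ [c]) - 1 ≤ q2 := hA4 _ hble hMs' hac
      rw [hq20] at hb2
      have : pvM pat (u ++ [c]) = 1 := by omega
      rw [this] at hac
      rw [hq20] at hc
      exact hc (by simpa using hac)
    omega

-- reference run: emit a position whenever pat is a suffix of the text read so far
def pvNaiveRun (pat : List String) : List String → Nat → List String → List Nat
  | [], _, _ => []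
  | c :: rest, i, u =>
    if pat <:+ u ++ [c] then (i + 1 - pat.length) :: pvNaiveRun pat rest (i + 1) (u ++ [c])
    else pvNaiveRun pat rest (i + 1) (u ++ [c])

theorem pvKmpLoop_eq_naiveRun (pat : List String) (hpat : pat ≠ []) :
    ∀ rest i u, pvKmpLoop pat rest i (pvM pat u) = pvNaiveRun pat rest i u := by
  intro rest
  induction rest with
  | nil => intro i u; rfl
  | cons c rest ih =>
    intro i u
    have hstep := pvStep pat u c hpat
    have hiff : (pvM pat (u ++ [c]) = pat.length) ↔ pat <:+ (u ++ [c]) := by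
      constructor
      · intro he
        have := pvM_suffix pat (u ++ [c])
        rw [he, List.take_length] at this
        exact this
      · intro hs
        refine le_antisymm (pvM_le _ _) ?_
        refine pvM_max pat (u ++ [c]) (le_refl _) ?_
        rw [List.take_length]
        exact hs
    simp only [pvKmpLoop, pvNaiveRun]
    rw [hstep]
    by_cases hs : pat <:+ u ++ [c]
    · rw [if_pos (hiff.mpr hs), if_pos hs, ih]
    · rw [if_neg (fun he => hs (hiff.mp he)), if_neg hs, ih]

theorem pvNaiveRun_eq_filter (pat : List String) :
    ∀ rest i u, pvNaiveRun pat rest i u =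
      ((List.range' i rest.length).filter
          (fun i' => decide (pat <:+ u ++ rest.take (i' + 1 - i)))).map
        (fun i' => i' + 1 - pat.length) := by
  intro rest
  induction rest with
  | nil => intro i u; rfl
  | cons c rest ih =>
    intro i u
    have htl : (List.range' (i + 1) rest.length).filter
          (fun i' => decide (pat <:+ u ++ (c :: rest).take (i' + 1 - i))) =
        (List.range' (i + 1) rest.length).filter
          (fun i' => decide (pat <:+ (u ++ [c]) ++ rest.take (i' + 1 - (i + 1)))) := by
      refine List.filter_congr ?_
      intro i' hmem
      obtain ⟨hge, _⟩ := List.mem_range'_1.mp hmem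
      rw [show i' + 1 - i = (i' + 1 - (i + 1)) + 1 by omega]
      simp [List.append_assoc]
    have hhd : (decide (pat <:+ u ++ (c :: rest).take (i + 1 - i))) =
        (decide (pat <:+ u ++ [c])) := by
      rw [show i + 1 - i = 1 by omega]
      norm_num
    simp only [pvNaiveRun, List.length_cons, List.range'_succ, List.filter_cons, htl, hhd,
      ih (i + 1) (u ++ [c])]
    by_cases hs : pat <:+ u ++ [c]
    · simp [hs]
    · simp [hs]

-- ---------- naive occurrence list ----------

def pvNaive (pat texto : List String) (desde : Nat) : List Nat :=
  (List.range' desde (texto.length + 1 - desde)).filter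
    (fun p => (texto.drop p).take pat.length == pat)

theorem pvOcurrencias_eq_naive (pat texto : List String) (desde : Nat) :
    pvOcurrencias pat texto desde = pvNaive pat texto desde := by
  by_cases hpat : pat = []
  · subst hpat
    rw [pvOcurrencias, if_pos rfl, pvNaive]
    symm
    refine List.filter_eq_self.mpr ?_
    intro p _
    simp
  · rw [pvOcurrencias, if_neg hpat, show (0 : Nat) = pvM pat [] from (pvM_nil pat hpat).symm,
      pvKmpLoop_eq_naiveRun pat hpat, pvNaiveRun_eq_filter, pvNaive]
    simp only [List.nil_append, List.length_drop]
    have hlen : 0 < pat.length := List.length_pos_of_ne_nil hpat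
    -- pointwise: "pat is a suffix of the text read so far" = "pat occurs ending at i'+1"
    have hEC : ∀ i', desde ≤ i' → i' < texto.length →
        ((pat <:+ (texto.drop desde).take (i' + 1 - desde)) ↔
          (desde + pat.length ≤ i' + 1 ∧
            (texto.drop (i' + 1 - pat.length)).take pat.length = pat)) := by
      intro i' h1 h2
      constructor
      · intro hs
        have hYlen : ((texto.drop desde).take (i' + 1 - desde)).length = i' + 1 - desde := by
          rw [List.length_take, List.length_drop]
          omega
        have hle : pat.length ≤ i' + 1 - desde := by
          have := hs.length_le
          rw [hYlen] at this
          exact this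
        refine ⟨by omega, ?_⟩
        have heq := List.suffix_iff_eq_drop.mp hs
        rw [hYlen, List.drop_take, List.drop_drop,
          show (i' + 1 - desde) - ((i' + 1 - desde) - pat.length) = pat.length by omega,
          show desde + ((i' + 1 - desde) - pat.length) = i' + 1 - pat.length by omega] at heq
        exact heq.symm
      · rintro ⟨hd, heq⟩
        rw [show i' + 1 - desde = ((i' + 1 - pat.length) - desde) + pat.length by omega,
          List.take_add, List.drop_drop,
          show desde + ((i' + 1 - pat.length) - desde) = i' + 1 - pat.length by omega, heq]
        exact List.suffix_append _ _
    -- both sides are strictly increasing lists with the same members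
    have hPL : (((List.range' desde (texto.length - desde)).filter
          (fun i' => decide (pat <:+ (texto.drop desde).take (i' + 1 - desde)))).map
        (fun i' => i' + 1 - pat.length)).Pairwise (· < ·) := by
      rw [List.pairwise_map]
      refine List.Pairwise.imp_of_mem ?_ ((List.pairwise_lt_range' 1).filter _)
      intro a b ha hb hab
      obtain ⟨hma, hca⟩ := List.mem_filter.mp ha
      obtain ⟨hga, hla⟩ := List.mem_range'_1.mp hma
      have ha' : a < texto.length := by omega
      have := ((hEC a hga ha').mp (of_decide_eq_true hca)).1
      omega
    have hPR : ((List.range' desde (texto.length + 1 - desde)).filter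
        (fun p => (texto.drop p).take pat.length == pat)).Pairwise (· < ·) :=
      (List.pairwise_lt_range' 1).filter _
    refine List.Perm.eq_of_pairwise (fun a b _ _ h1 h2 => by omega) hPL hPR ?_
    refine (List.perm_ext_iff_of_nodup (hPL.imp fun h => Nat.ne_of_lt h)
      (hPR.imp fun h => Nat.ne_of_lt h)).mpr ?_
    intro p
    simp only [List.mem_map, List.mem_filter, List.mem_range'_1, decide_eq_true_eq, beq_iff_eq]
    constructor
    · rintro ⟨i', ⟨⟨hge, hlt⟩, hc⟩, rfl⟩
      have hi' : i' < texto.length := by omega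
      obtain ⟨hd, heq⟩ := (hEC i' hge hi').mp hc
      exact ⟨⟨by omega, by omega⟩, heq⟩
    · rintro ⟨⟨hge, hlt⟩, heq⟩
      have hplen : pat.length ≤ texto.length - p := by
        have := congrArg List.length heq
        rw [List.length_take, List.length_drop] at this
        omega
      have hpn : p < texto.length := by omega
      refine ⟨p + pat.length - 1, ⟨⟨by omega, by omega⟩, ?_⟩, by omega⟩
      refine (hEC _ (by omega) (by omega)).mpr ⟨by omega, ?_⟩
      rw [show p + pat.length - 1 + 1 - pat.length = p by omega]
      exact heq

-- ---------- bridging A's Int-indexed scans to pvNaive ----------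

theorem pvFilterTrim (cond : Nat → Bool) (a c₁ c₂ : Nat) (h : c₂ ≤ c₁)
    (hc : ∀ p, p < a + c₁ → cond p = true → p < a + c₂) :
    (List.range' a c₁).filter cond = (List.range' a c₂).filter cond := by
  have hsplit : List.range' a c₁ = List.range' a c₂ ++ List.range' (a + c₂) (c₁ - c₂) := by
    rw [show c₁ = c₂ + (c₁ - c₂) from (by omega)]
    rw [← List.range'_append]
    simp
  have hnil : (List.range' (a + c₂) (c₁ - c₂)).filter cond = [] := by
    refine List.filter_eq_nil_iff.mpr ?_
    intro p hp hcp
    obtain ⟨h1, h2⟩ := List.mem_range'_1.mp hp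
    exact absurd (hc p (by omega) hcp) (by omega)
  rw [hsplit, List.filter_append, hnil, List.append_nil]

theorem pvSel_eq (lista ti : List String) :
    (PySem.List.pyRange 0 ((lista.length : Int) - (ti.length : Int) + 1) 1).filter
        (fun i => PySem.List.slice lista (some i) (some (i + (ti.length : Int))) == ti) =
      (pvNaive ti lista 0).map (fun p : Nat => (p : Int)) := by
  rw [PySem.List.pyRange_one]
  simp only [zero_add, Int.sub_zero]
  rw [List.filter_map]
  have hcc : ((fun i => PySem.List.slice lista (some i) (some (i + (ti.length : Int))) == ti) ∘
      (fun k : Nat => (k : Int))) = (fun p : Nat => (lista.drop p).take ti.length == ti) := by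
    funext p
    simp only [Function.comp_apply]
    rw [PySem.List.slice_natCast_add]
  rw [hcc]
  have hN : (((lista.length : Int) - (ti.length : Int) + 1)).toNat =
      lista.length + 1 - ti.length := by omega
  have htrim := pvFilterTrim (fun p : Nat => (lista.drop p).take ti.length == ti) 0
      (lista.length + 1) (lista.length + 1 - ti.length) (by omega) ?_
  · rw [hN, List.range_eq_range', pvNaive, Nat.sub_zero, htrim]
  · intro p hp hcp
    have := congrArg List.length (eq_of_beq hcp)
    rw [List.length_take, List.length_drop] at this
    omega

theorem pvFind_eq (lista tf : List String) (c : Nat) :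
    (PySem.List.pyRange (c : Int) ((lista.length : Int) - (tf.length : Int) + 1) 1).find?
        (fun j => PySem.List.slice lista (some j) (some (j + (tf.length : Int))) == tf) =
      ((pvNaive tf lista c).map (fun p : Nat => (p : Int))).head? := by
  rw [PySem.List.pyRange_one]
  have hmap : (fun k : Nat => (c : Int) + (k : Int)) =
      ((fun p : Nat => (p : Int)) ∘ (fun k : Nat => c + k)) := by
    funext k
    simp only [Function.comp_apply]
    push_cast
    ring
  rw [hmap, ← List.map_map, ← List.range'_eq_map_range, List.find?_map]
  have hcc : ((fun j => PySem.List.slice lista (some j) (some (j + (tf.length : Int))) == tf) ∘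
      (fun p : Nat => (p : Int))) = (fun p : Nat => (lista.drop p).take tf.length == tf) := by
    funext p
    simp only [Function.comp_apply]
    rw [PySem.List.slice_natCast_add]
  rw [hcc, ← List.head?_filter]
  have hN : (((lista.length : Int) - (tf.length : Int) + 1 - (c : Int))).toNat =
      lista.length + 1 - tf.length - c := by omega
  rw [hN]
  have htrim := pvFilterTrim (fun p : Nat => (lista.drop p).take tf.length == tf) c
      (lista.length + 1 - c) (lista.length + 1 - tf.length - c) (by omega) ?_
  · rw [← htrim, pvNaive]
    simp
  · intro p hp hcp
    have := congrArg List.length (eq_of_beq hcp)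
    rw [List.length_take, List.length_drop] at this
    omega

-- ===== VERDICT (by name: the statement is the Claim_ definition above) =====
theorem imprimir_texto_entre_tokens_spec : Claim_equal_imprimir_texto_entre_tokens := by
  intro lista_tokens tokens_inicio tokens_fin ocurrencia _
  show imprimir_texto_entre_tokens lista_tokens tokens_inicio tokens_fin ocurrencia =
    imprimir_texto_entre_tokens_alt lista_tokens tokens_inicio tokens_fin ocurrencia
  unfold imprimir_texto_entre_tokens imprimir_texto_entre_tokens_alt
  rw [pvAOuterLoop_eq_select]
  simp only [Int.sub_zero, pvOcurrencias_eq_naive, pvSel_eq]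
  set N := pvNaive tokens_inicio lista_tokens 0 with hNdef
  by_cases hoc : 1 ≤ ocurrencia ∧ ocurrencia ≤ (N.length : Int)
  · have hidx : (ocurrencia - 1).toNat < N.length := by omega
    rw [if_pos (by simpa using hoc), if_pos hoc]
    have hget : ((N.map (fun p : Nat => (p : Int)))[(ocurrencia - 1).toNat]?).getD 0 =
        ((N.getD (ocurrencia - 1).toNat 0 : Nat) : Int) := by
      rw [List.getElem?_map, List.getElem?_eq_getElem hidx, List.getD_eq_getElem?_getD,
        List.getElem?_eq_getElem hidx]
      rfl
    rw [hget, pvAInnerLoop_eq_find,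
      show ((N.getD (ocurrencia - 1).toNat 0 : Nat) : Int) + (tokens_inicio.length : Int) =
        ((N.getD (ocurrencia - 1).toNat 0 + tokens_inicio.length : Nat) : Int) by push_cast; ring,
      pvFind_eq lista_tokens tokens_fin (N.getD (ocurrencia - 1).toNat 0 + tokens_inicio.length)]
    cases hfin : pvNaive tokens_fin lista_tokens
        (N.getD (ocurrencia - 1).toNat 0 + tokens_inicio.length) with
    | nil => simp
    | cons j rest =>
      simp only [List.map_cons, List.head?_cons]
      rw [PySem.List.slice_natCast]
  · rw [if_neg (by simpa using hoc), if_neg hoc]
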